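-- pv_equiv track=rewrite | github.com/dbamman/movie-representation | scripts/count_gender_ethnicity.py | get_gender_for_year
-- ===== SOURCE A (Python) =====
-- def get_gender_for_year(gender_json, year):
-- 	ordered_years=sorted(list(gender_json.keys()))
-- 	if len(ordered_years) == 1:
-- 		return gender_json[ordered_years[0]].split("#")
--
-- 	for idx, thisyear in enumerate(ordered_years):
--
-- 		# if we've reach the last value, return that
-- 		if idx == len(ordered_years)-1:
-- 			return gender_json[thisyear].split("#")
--
-- 		# otherwise check if the target year is between the current year and the next one in the list
-- 		nextyear=ordered_years[idx+1]
-- 		if year >= thisyear and year < nextyear: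
-- 			return gender_json[thisyear].split("#")
-- ===== SOURCE B (Python) =====
-- def get_gender_for_year(gender_json, year):
-- 	# Count keys <= year in the sorted key list (= bisect_right position),
-- 	# then pick once by index instead of scanning intervals.
-- 	ordered_years = sorted(gender_json)
-- 	p = sum(1 for k in ordered_years if k <= year)
-- 	if 1 <= p <= len(ordered_years) - 1:
-- 		return gender_json[ordered_years[p - 1]].split("#")
-- 	return gender_json[ordered_years[-1]].split("#")
-- ===== Notes on version B (the rewrite author's own statement) =====
-- stated objective: simpler
-- what changed: Replaces the enumerate-and-interval scan (with its separate single-key special case) by counting the sorted keys <= year (the bisect_right position) and doing one indexed lookup with a single boundary branch.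
-- outside the precondition, e.g. on get_gender_for_year({}, '1990'): A returns None, B raises IndexError
import Mathlib
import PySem

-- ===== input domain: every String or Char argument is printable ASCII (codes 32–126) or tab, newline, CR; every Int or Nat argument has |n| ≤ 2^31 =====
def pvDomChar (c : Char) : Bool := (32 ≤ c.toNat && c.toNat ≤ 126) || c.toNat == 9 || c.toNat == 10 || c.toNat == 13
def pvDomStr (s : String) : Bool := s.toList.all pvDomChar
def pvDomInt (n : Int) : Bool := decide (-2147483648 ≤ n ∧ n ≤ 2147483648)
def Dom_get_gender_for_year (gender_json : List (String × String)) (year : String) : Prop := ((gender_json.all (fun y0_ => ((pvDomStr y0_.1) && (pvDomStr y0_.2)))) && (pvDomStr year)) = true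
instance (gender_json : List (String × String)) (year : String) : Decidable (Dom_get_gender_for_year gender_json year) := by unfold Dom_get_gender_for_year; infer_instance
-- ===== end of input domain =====

-- B replaces A's enumerate-and-interval scan by counting the sorted keys <= year and one indexed
-- lookup with a single boundary branch (objective: simpler; same return value on nonempty dicts).

-- shared helper: s.split("#") — separator is the nonempty literal "#", so split? never returns none
def pvSplitHash (s : String) : List String := (PySem.Str.split? s "#").getD []

-- ===== PORT A =====
-- the for-loop over enumerate(ordered_years); lookups use Dict.getD "" — the key is always drawn
-- from the dict's own key list, so Python's d[k] cannot raise there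
def pvALoop (d : PySem.Dict String String) (year : String) (ys : List String) :
    List (Int × String) → List String
  | [] => []  -- Python falls off the loop (only reachable for an empty dict, excluded by Pre_)
  | (idx, thisyear) :: rest =>
    if idx = (ys.length : Int) - 1 then pvSplitHash (d.getD thisyear "")
    else
      let nextyear := PySem.List.pyGetD ys (idx + 1) ""
      if year ≥ thisyear ∧ year < nextyear then pvSplitHash (d.getD thisyear "")
      else pvALoop d year ys rest

def get_gender_for_year (gender_json : List (String × String)) (year : String) : List String :=
  let d := PySem.Dict.ofList gender_json
  let ordered_years := PySem.List.sorted d.keys (fun x => x)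
  if ordered_years.length = 1 then
    pvSplitHash (d.getD (PySem.List.pyGetD ordered_years 0 "") "")
  else
    pvALoop d year ordered_years (PySem.List.enumerate ordered_years 0)

-- ===== PORT B =====
def get_gender_for_year_alt (gender_json : List (String × String)) (year : String) : List String :=
  let d := PySem.Dict.ofList gender_json
  let ordered_years := PySem.List.sorted d.keys (fun x => x)
  let p : Int := ordered_years.foldl (fun acc k => if k ≤ year then acc + 1 else acc) 0
  if 1 ≤ p ∧ p ≤ (ordered_years.length : Int) - 1 then
    pvSplitHash (d.getD (PySem.List.pyGetD ordered_years (p - 1) "") "")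
  else
    pvSplitHash (d.getD (PySem.List.pyGetD ordered_years (-1) "") "")

-- ===== PRECONDITION & SPEC =====
-- Pre_ excludes only the empty dict, on which A falls off its loop and returns None (no list value).
def Pre_get_gender_for_year (gender_json : List (String × String)) (year : String) : Prop :=
  gender_json ≠ []
instance (gender_json : List (String × String)) (year : String) : Decidable (Pre_get_gender_for_year gender_json year) := by unfold Pre_get_gender_for_year; infer_instance

def pvWitness_get_gender_for_year : (List (String × String)) × String :=
  ([("1990", "m#f"), ("2000", "f#m")], "1995")

def Spec_get_gender_for_year (gender_json : List (String × String)) (year : String) (out : List String) : Prop := out = get_gender_for_year_alt gender_json year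
instance (gender_json : List (String × String)) (year : String) (out : List String) : Decidable (Spec_get_gender_for_year gender_json year out) := by unfold Spec_get_gender_for_year; infer_instance

-- ===== CLAIM (what is proved, stated in full; the proofs are below) =====
def Claim_equal_get_gender_for_year : Prop := ∀ (gender_json : List (String × String)) (year : String), Dom_get_gender_for_year gender_json year → Pre_get_gender_for_year gender_json year → Spec_get_gender_for_year gender_json year (get_gender_for_year gender_json year)

-- ===== LEMMAS AND PROOFS =====

-- structural reading of A's loop (proof-only)
def pvSLoop (d : PySem.Dict String String) (year : String) : List String → List String
  | [] => []
  | [x] => pvSplitHash (d.getD x "")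
  | x :: y :: t =>
    if year ≥ x ∧ year < y then pvSplitHash (d.getD x "")
    else pvSLoop d year (y :: t)

lemma pvALoop_drop (d : PySem.Dict String String) (year : String) (ys : List String) :
    ∀ (n i : Nat), i ≤ ys.length → ys.length - i = n →
    pvALoop d year ys (PySem.List.enumerate (ys.drop i) (i : Int)) = pvSLoop d year (ys.drop i) := by
  intro n
  induction n with
  | zero =>
    intro i hi h0
    have : ys.drop i = [] := by
      apply List.eq_nil_of_length_eq_zero; simp [List.length_drop]; omega
    simp [this, pvALoop, pvSLoop]
  | succ m ih =>
    intro i hi hn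
    have hlt : i < ys.length := by omega
    have hcons : ys.drop i = ys[i] :: ys.drop (i + 1) := List.drop_eq_getElem_cons hlt
    rw [hcons, PySem.List.enumerate_cons, pvALoop]
    by_cases hlast : (i : Int) = (ys.length : Int) - 1
    · have hrest : ys.drop (i + 1) = [] := by
        apply List.eq_nil_of_length_eq_zero; simp [List.length_drop]; omega
      simp [hlast, hrest, pvSLoop]
    · have hi1 : i + 1 < ys.length := by omega
      have hnext : PySem.List.pyGetD ys ((i : Int) + 1) "" = ys[i + 1] := by
        rw [show ((i : Int) + 1) = ((i + 1 : Nat) : Int) by push_cast; ring,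
            PySem.List.pyGetD_eq_getElem ys "" (by positivity) (by exact_mod_cast hi1)]
        simp
      have hrest : ys.drop (i + 1) = ys[i + 1] :: ys.drop (i + 2) := List.drop_eq_getElem_cons hi1
      rw [if_neg hlast]
      simp only [hnext]
      by_cases hcond : year ≥ ys[i] ∧ year < ys[i + 1]
      · rw [if_pos hcond, hrest, pvSLoop, if_pos hcond]
      · rw [if_neg hcond]
        have := ih (i + 1) (by omega) (by omega)
        rw [show ((i : Int) + 1) = ((i + 1 : Nat) : Int) by push_cast; ring, this, hrest,
            pvSLoop, if_neg hcond, ← hrest]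

-- A's whole body equals the structural loop on a nonempty sorted list
lemma pvA_eq_sLoop (d : PySem.Dict String String) (year : String) (ys : List String) (h : ys ≠ []) :
    (if ys.length = 1 then pvSplitHash (d.getD (PySem.List.pyGetD ys 0 "") "")
     else pvALoop d year ys (PySem.List.enumerate ys 0)) = pvSLoop d year ys := by
  match ys, h with
  | [x], _ => simp [pvSLoop, PySem.List.pyGetD_zero_cons]
  | x :: y :: t, _ =>
    have hlen : (x :: y :: t).length ≠ 1 := by simp
    rw [if_neg hlen]
    have := pvALoop_drop d year (x :: y :: t) (x :: y :: t).length 0 (by omega) (by omega)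
    simpa using this

-- B's count as countP
lemma pvCount_eq (year : String) (ys : List String) :
    ys.foldl (fun acc k => if k ≤ year then acc + 1 else acc) (0 : Int)
      = (ys.countP (fun k => decide (k ≤ year)) : Int) := by
  have := PySem.List.foldl_count_if (fun k => decide (k ≤ year)) ys 0
  simpa using this

-- the main equivalence on a sorted nonempty key list
lemma pvSLoop_eq_B (d : PySem.Dict String String) (year : String) :
    ∀ (ys : List String), ys ≠ [] → ys.Pairwise (· ≤ ·) →
    pvSLoop d year ys =
      (if 1 ≤ (ys.countP (fun k => decide (k ≤ year)) : Int) ∧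
          (ys.countP (fun k => decide (k ≤ year)) : Int) ≤ (ys.length : Int) - 1 then
        pvSplitHash (d.getD (PySem.List.pyGetD ys ((ys.countP (fun k => decide (k ≤ year)) : Int) - 1) "") "")
      else pvSplitHash (d.getD (PySem.List.pyGetD ys (-1) "") "")) := by
  intro ys
  induction ys with
  | nil => intro h; exact absurd rfl h
  | cons x rest ih =>
    intro _ hpw
    match rest, hpw with
    | [], _ =>
      have hc : ([x].countP (fun k => decide (k ≤ year))) ≤ 1 := by
        have := List.countP_le_length (p := fun k => decide (k ≤ year)) (l := [x])
        simpa using this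
      rw [pvSLoop, if_neg (by push_cast [List.length_cons, List.length_nil]; omega)]
      simp [PySem.List.pyGetD_neg_one [x] "" (by simp)]
    | y :: t, hpw =>
      rw [List.pairwise_cons] at hpw
      obtain ⟨hxall, hpw'⟩ := hpw
      have hyt : ∀ z ∈ t, y ≤ z := (List.pairwise_cons.mp hpw').1
      have hxy : x ≤ y := hxall y (by simp)
      rw [pvSLoop]
      by_cases hcond : year ≥ x ∧ year < y
      · rw [if_pos hcond]
        have hcx : (fun k => decide (k ≤ year)) x = true := by simp [hcond.1]
        have hct : (y :: t).countP (fun k => decide (k ≤ year)) = 0 := by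
          rw [List.countP_eq_zero]
          intro z hz
          have hyz : y ≤ z := by
            rcases List.mem_cons.mp hz with hz | hz
            · exact hz ▸ le_refl y
            · exact hyt z hz
          have : year < z := lt_of_lt_of_le hcond.2 hyz
          simp [not_le.mpr this]
        have hc : (x :: y :: t).countP (fun k => decide (k ≤ year)) = 1 := by
          rw [List.countP_cons, hct, if_pos (by simp [hcond.1])]
        rw [hc, if_pos (⟨by norm_num, by push_cast [List.length_cons]; omega⟩)]
        norm_num [PySem.List.pyGetD_zero_cons]
      · rw [if_neg hcond]
        rw [ih (by simp) hpw']
        set c' := (y :: t).countP (fun k => decide (k ≤ year)) with hc'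
        rcases not_and_or.mp hcond with hx | hy
        · -- year < x : nothing is counted on either side; both take the last element
          have hxyear : ¬ x ≤ year := fun hle => hx hle
          have hc0 : c' = 0 := by
            rw [hc', List.countP_eq_zero]
            intro z hz
            have : ¬ z ≤ year := fun hle => hxyear (le_trans (hxall z hz) hle)
            simp [this]
          have hcc : (x :: y :: t).countP (fun k => decide (k ≤ year)) = 0 := by
            rw [List.countP_cons, if_neg (by simp [hxyear]), ← hc', hc0]
          rw [hc0, hcc, if_neg (by simp), if_neg (by simp)]
          rw [PySem.List.pyGetD_neg_one (y :: t) "" (by simp),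
              PySem.List.pyGetD_neg_one (x :: y :: t) "" (by simp)]
          simp [List.getLast_cons]
        · -- y ≤ year : x is counted as well, shift the index by one
          have hyyear : y ≤ year := not_lt.mp hy
          have hxyear : x ≤ year := le_trans hxy hyyear
          have hcc : (x :: y :: t).countP (fun k => decide (k ≤ year)) = c' + 1 := by
            rw [List.countP_cons, if_pos (by simp [hxyear]), ← hc']
          have hc1 : 1 ≤ c' := by
            rw [hc']
            exact List.countP_pos_iff.mpr ⟨y, by simp, by simp [hyyear]⟩
          have hcle : c' ≤ t.length + 1 := by
            have := List.countP_le_length (p := fun k => decide (k ≤ year)) (l := y :: t)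
            rw [hc']; simpa using this
          rw [hcc]
          by_cases hin : 1 ≤ (c' : Int) ∧ (c' : Int) ≤ ((y :: t).length : Int) - 1
          · rw [if_pos hin, if_pos (by push_cast [List.length_cons] at hin ⊢; omega)]
            have h1 : ((((c' : Nat) : Int) + 1) - 1) = ((c' : Nat) : Int) := by ring
            push_cast
            rw [h1, PySem.List.pyGetD_eq_getElem (x :: y :: t) "" (by positivity)
                  (by push_cast [List.length_cons] at hin ⊢; omega),
                PySem.List.pyGetD_eq_getElem (y :: t) "" (by push_cast; omega)
                  (by push_cast [List.length_cons] at hin ⊢; omega)]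
            congr 2
            have e1 : (((c' : Nat) : Int)).toNat = c' := by simp
            have e2 : ((((c' : Nat) : Int)) - 1).toNat = c' - 1 := by omega
            simp only [e1, e2]
            conv_rhs => rw [List.getElem_cons]
            rw [dif_neg (by omega : ¬ c' = 0)]
          · rw [if_neg hin, if_neg (by push_cast [List.length_cons] at hin ⊢; omega)]
            rw [PySem.List.pyGetD_neg_one (y :: t) "" (by simp),
                PySem.List.pyGetD_neg_one (x :: y :: t) "" (by simp)]
            simp [List.getLast_cons]

-- nonempty input gives a nonempty sorted key list
lemma pvKeys_ne (gender_json : List (String × String)) (h : gender_json ≠ []) :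
    PySem.List.sorted (PySem.Dict.ofList gender_json).keys (fun x => x) ≠ [] := by
  intro hnil
  rw [PySem.List.sorted_eq_nil_iff] at hnil
  match gender_json, h with
  | (k, v) :: l, _ =>
    have hk : k ∈ (PySem.Dict.ofList ((k, v) :: l)).keys := by
      have hkeys := PySem.Dict.keys_foldl_insert_key (l := (k, v) :: l)
        (key := Prod.fst) (f := fun d p => p.2) (d := (PySem.Dict.empty : PySem.Dict String String))
      have : (PySem.Dict.ofList ((k, v) :: l)).keys
          = PySem.Set.update (PySem.Dict.empty : PySem.Dict String String).keys (((k, v) :: l).map Prod.fst) := hkeys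
      rw [this]
      have : PySem.Set.update (PySem.Dict.empty : PySem.Dict String String).keys (((k, v) :: l).map Prod.fst)
          = PySem.Set.ofList (((k, v) :: l).map Prod.fst) := rfl
      rw [this, PySem.Set.mem_ofList]
      simp
    rw [hnil] at hk
    simp at hk

-- ===== VERDICT (by name: the statement is the Claim_ definition above) =====
theorem get_gender_for_year_spec : Claim_equal_get_gender_for_year := by
  intro gender_json year _ hpre
  unfold Spec_get_gender_for_year get_gender_for_year get_gender_for_year_alt
  have hne : PySem.List.sorted (PySem.Dict.ofList gender_json).keys (fun x => x) ≠ [] :=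
    pvKeys_ne gender_json hpre
  have hpw := PySem.List.sorted_pairwise (PySem.Dict.ofList gender_json).keys (fun x => x)
  simp only [pvCount_eq]
  rw [pvA_eq_sLoop _ _ _ hne, pvSLoop_eq_B _ _ _ hne hpw]
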